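-- pv_equiv track=rewrite | github.com/HA2004ha/AP-project | AP project/AP Project.py | break_str
-- ===== SOURCE A (Python) =====
-- def break_str(string):
--     new_string = ""
--     j=0
--     for i in range(len(string)):
--         if string[i]==" ":
--             j+=1
--         if string[i] == " " and  i != len(string)-1 and j%3==0:
--
--             new_string += "\n"
--         else:
--             new_string += string[i]
--     return new_string
-- ===== SOURCE B (Python) =====
-- def break_str(string):
--     # Split on spaces once; walk the parts, emitting the k-th separator as a
--     # newline for every third space, except when that space is the string's
--     # final character (then it stays a space, as in the original).
--     parts = string.split(' ')
--     out = parts[0]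
--     j = 0
--     for part in parts[1:]:
--         j += 1
--         last = (j == len(parts) - 1 and part == '')
--         out += ('\n' if j % 3 == 0 and not last else ' ') + part
--     return out
-- ===== Notes on version B (the rewrite author's own statement) =====
-- stated objective: idiomatic
-- what changed: Replaces A's per-character loop with a running space counter and last-index test by the idiomatic decomposition: split the string on spaces once, then rebuild it from the parts, emitting every third separating space as a newline except when that space is the string's final character (as A does).
import Mathlib
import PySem

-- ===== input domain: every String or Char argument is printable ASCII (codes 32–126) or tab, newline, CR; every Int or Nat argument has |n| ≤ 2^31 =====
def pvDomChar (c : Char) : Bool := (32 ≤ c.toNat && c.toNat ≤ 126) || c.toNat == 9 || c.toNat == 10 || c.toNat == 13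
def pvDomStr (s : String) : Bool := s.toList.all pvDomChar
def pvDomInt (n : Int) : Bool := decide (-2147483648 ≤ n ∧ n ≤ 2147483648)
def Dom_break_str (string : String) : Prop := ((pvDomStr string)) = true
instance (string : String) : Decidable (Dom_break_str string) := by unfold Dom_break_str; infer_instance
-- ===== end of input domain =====

-- B replaces A's per-character counter loop by the idiomatic split-on-space /
-- rejoin-with-separators decomposition; same return value, no speed claim.

-- ===== PORT A =====
-- A's `for i in range(len(string))` with `string[i]` ported as the structural
-- recursion over string.toList with the same state (new_string, j);
-- `i != len(string)-1` is exactly `rest ≠ []` (exact: i walks 0..len-1).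
def pvLoopA : List Char → Nat → List Char → List Char
  | [], _, acc => acc
  | c :: rest, j, acc =>
    let j' := if c = ' ' then j + 1 else j
    if c = ' ' ∧ rest ≠ [] ∧ j' % 3 = 0 then pvLoopA rest j' (acc ++ ['\n'])
    else pvLoopA rest j' (acc ++ [c])

def break_str (string : String) : String :=
  String.mk (pvLoopA string.toList 0 [])

-- ===== PORT B =====
-- Source B's `for part in parts[1:]` with state (out, j); n = len(parts).
def pvLoopB (n : Nat) : List (List Char) → Nat → List Char → List Char
  | [], _, out => out
  | p :: rest, j, out =>
    let j' := j + 1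
    let last := j' = n - 1 ∧ p = ([] : List Char)
    pvLoopB n rest j' (out ++ (if j' % 3 = 0 ∧ ¬ last then ['\n'] else [' ']) ++ p)

def break_str_alt (string : String) : String :=
  let parts := PySem.Chars.splitOn string.toList [' ']
  match parts with
  | [] => ""  -- unreachable: split never returns an empty list
  | p :: rest => String.mk (pvLoopB (p :: rest).length rest 0 p)

-- ===== PRECONDITION & SPEC =====
def Spec_break_str (string : String) (out : String) : Prop := out = break_str_alt string
instance (string : String) (out : String) : Decidable (Spec_break_str string out) := by unfold Spec_break_str; infer_instance

-- ===== CLAIM (what is proved, stated in full; the proofs are below) =====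
def Claim_equal_break_str : Prop := ∀ (string : String), Dom_break_str string → Spec_break_str string (break_str string)

-- ===== LEMMAS AND PROOFS =====

-- cons-building version of A's loop
def pvFA : List Char → Nat → List Char
  | [], _ => []
  | c :: rest, j =>
    let j' := if c = ' ' then j + 1 else j
    if c = ' ' ∧ rest ≠ [] ∧ j' % 3 = 0 then '\n' :: pvFA rest j'
    else c :: pvFA rest j'

theorem pvLoopA_eq (cs : List Char) : ∀ (j : Nat) (acc : List Char),
    pvLoopA cs j acc = acc ++ pvFA cs j := by
  induction cs with
  | nil => intro j acc; simp [pvLoopA, pvFA]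
  | cons c rest ih =>
    intro j acc
    simp only [pvLoopA, pvFA]
    split_ifs <;> simp [ih]

-- structural characterisation of Python's split(' ')
def pvSplitSp : List Char → List (List Char)
  | [] => [[]]
  | c :: rest =>
    if c = ' ' then [] :: pvSplitSp rest
    else
      match pvSplitSp rest with
      | [] => [[c]]  -- unreachable
      | q :: t => (c :: q) :: t

def pvConsHd (p : List Char) : List (List Char) → List (List Char)
  | [] => [p]
  | q :: t => (p ++ q) :: t

theorem pvSplitSp_ne_nil (cs : List Char) : pvSplitSp cs ≠ [] := by
  cases cs with
  | nil => simp [pvSplitSp]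
  | cons c rest =>
    simp only [pvSplitSp]
    split_ifs
    · simp
    · cases h : pvSplitSp rest <;> simp

theorem pvSplitSp_eq_single_iff (cs : List Char) : pvSplitSp cs = [[]] ↔ cs = [] := by
  cases cs with
  | nil => simp [pvSplitSp]
  | cons c rest =>
    constructor
    · intro h
      exfalso
      simp only [pvSplitSp] at h
      split_ifs at h with hc
      · exact pvSplitSp_ne_nil rest (by injection h)
      · cases hq : pvSplitSp rest <;> rw [hq] at h <;> simp at h
    · intro h; exact absurd h (List.cons_ne_nil _ _)

theorem pvSplitOn_go_space (fuel : Nat) : ∀ (l cur : List Char) (acc : List (List Char)),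
    l.length < fuel →
    PySem.Chars.splitOn.go [' '] fuel l cur acc =
      acc.reverse ++ pvConsHd cur.reverse (pvSplitSp l) := by
  induction fuel with
  | zero => intro l cur acc h; omega
  | succ fuel ih =>
    intro l cur acc h
    cases l with
    | nil => simp [PySem.Chars.splitOn.go, pvSplitSp, pvConsHd]
    | cons c rest =>
      simp only [PySem.Chars.splitOn.go]
      by_cases hc : c = ' '
      · have hpre : List.isPrefixOf [' '] (c :: rest) = true := by
          subst hc; simp [List.isPrefixOf]
        rw [if_pos hpre]
        have hdrop : List.drop [' '].length (c :: rest) = rest := by simp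
        rw [hdrop, ih rest [] (cur.reverse :: acc) (by simp at h ⊢; omega)]
        have hne := pvSplitSp_ne_nil rest
        cases hs : pvSplitSp rest with
        | nil => exact absurd hs hne
        | cons q t => simp [pvSplitSp, hc, hs, pvConsHd]
      · have hpre : List.isPrefixOf [' '] (c :: rest) = false := by
          simp [List.isPrefixOf]; intro h'; exact absurd h'.symm hc
        rw [if_neg (by simp [hpre])]
        rw [ih rest (c :: cur) acc (by simp at h ⊢; omega)]
        have hne := pvSplitSp_ne_nil rest
        cases hs : pvSplitSp rest with
        | nil => exact absurd hs hne
        | cons q t => simp [pvSplitSp, hc, hs, pvConsHd]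

theorem pvSplitOn_space (cs : List Char) :
    PySem.Chars.splitOn cs [' '] = pvSplitSp cs := by
  have := pvSplitOn_go_space (cs.length + 1) cs [] [] (by omega)
  simp only [PySem.Chars.splitOn] at *
  rw [this]
  have hne := pvSplitSp_ne_nil cs
  cases hs : pvSplitSp cs with
  | nil => exact absurd hs hne
  | cons q t => simp [pvConsHd]

-- cons-building, relative-index version of B's loop
def pvG : List (List Char) → Nat → List Char
  | [], _ => []
  | p :: rest, j =>
    (if (j + 1) % 3 = 0 ∧ ¬ (rest = [] ∧ p = []) then '\n' else ' ') :: p ++ pvG rest (j + 1)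

theorem pvLoopB_eq (ps : List (List Char)) : ∀ (n j : Nat) (out : List Char),
    n = j + 1 + ps.length →
    pvLoopB n ps j out = out ++ pvG ps j := by
  induction ps with
  | nil => intro n j out _; simp [pvLoopB, pvG]
  | cons p rest ih =>
    intro n j out hn
    simp only [pvLoopB, pvG]
    rw [ih n (j + 1) _ (by simp at hn ⊢; omega)]
    have hlast : (j + 1 = n - 1 ∧ p = ([] : List Char)) ↔ (rest = [] ∧ p = []) := by
      constructor
      · rintro ⟨h1, h2⟩
        refine ⟨?_, h2⟩
        have : rest.length = 0 := by simp at hn; omega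
        exact List.length_eq_zero_iff.mp this
      · rintro ⟨h1, h2⟩
        subst h1
        refine ⟨?_, h2⟩
        simp at hn; omega
    split_ifs with h1 h2 h2
    · simp
    · exact absurd (And.intro h1.1 (fun hl => h1.2 (hlast.mpr hl))) h2
    · exact absurd (And.intro h2.1 (fun hl => h2.2 (hlast.mp hl))) h1
    · simp

-- the key lemma: A's loop equals B's glue over the split parts
theorem pvFA_eq_glue (cs : List Char) : ∀ (j : Nat),
    pvFA cs j = (pvSplitSp cs).headI ++ pvG (pvSplitSp cs).tail j := by
  induction cs with
  | nil => intro j; simp [pvFA, pvSplitSp, pvG]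
  | cons c rest ih =>
    intro j
    have hne := pvSplitSp_ne_nil rest
    cases hs : pvSplitSp rest with
    | nil => exact absurd hs hne
    | cons p t =>
      have hiff : rest = [] ↔ (t = [] ∧ p = []) := by
        rw [← pvSplitSp_eq_single_iff rest, hs]
        simp [and_comm]
      by_cases hc : c = ' '
      · subst hc
        have hrec := ih (j + 1)
        rw [hs] at hrec
        simp only [List.headI, List.tail] at hrec
        have hsp : pvSplitSp (' ' :: rest) = [] :: p :: t := by simp [pvSplitSp, hs]
        rw [hsp]
        simp only [List.headI, List.tail, List.nil_append]
        by_cases h3 : (j + 1) % 3 = 0 <;> by_cases hr : rest = []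
        · obtain ⟨ht, hp⟩ := hiff.mp hr
          subst ht; subst hp; subst hr
          simp [pvFA, pvG, h3]
        · have hnl : ¬ (t = [] ∧ p = []) := fun h => hr (hiff.mpr h)
          simp [pvFA, pvG, h3, hr, hnl, hrec]
        · simp [pvFA, pvG, h3, hrec]
        · simp [pvFA, pvG, h3, hrec]
      · have hrec := ih j
        rw [hs] at hrec
        simp only [List.headI, List.tail] at hrec
        have hsp : pvSplitSp (c :: rest) = (c :: p) :: t := by simp [pvSplitSp, hc, hs]
        rw [hsp]
        simp only [List.headI, List.tail]
        simp [pvFA, hc, hrec]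

-- ===== VERDICT (by name: the statement is the Claim_ definition above) =====
theorem break_str_spec : Claim_equal_break_str := by
  intro s _
  unfold Spec_break_str break_str break_str_alt
  rw [pvSplitOn_space]
  have hne := pvSplitSp_ne_nil s.toList
  cases hs : pvSplitSp s.toList with
  | nil => exact absurd hs hne
  | cons p rest =>
    simp only
    rw [pvLoopA_eq, pvLoopB_eq rest _ 0 p (by simp; omega), List.nil_append]
    have := pvFA_eq_glue s.toList 0
    rw [hs] at this
    simp only [List.headI, List.tail] at this
    rw [this]
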